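-- pv_equiv track=rewrite | github.com/SAJANCODER/python-mastering | list_programs/slicing/q13.py | count_rotation
-- ===== SOURCE A (Python) =====
-- def count_rotation(lst,k,n):
--     k = k%n
--     org = lst[:]
--     mirror = lst[:]
--     count = 0
--     while True:
--         mirror = mirror[-k:] + mirror[:-k]
--         count+=1
--         if mirror == org:
--             return count
-- ===== SOURCE B (Python) =====
-- def _gcd(a, b):
--     while b:
--         a, b = b, a % b
--     return a
--
--
-- def _rot_index(lst, target, m):
--     # smallest i in 1..m-1 whose left rotation of lst equals target, else m
--     return next((i for i in range(1, m) if lst[i:] + lst[:i] == target), m)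
--
--
-- def count_rotation(lst, k, n):
--     rotated = lst[-(k % n):] + lst[:-(k % n)]
--     if rotated == lst:
--         return 1
--     m = len(lst)
--     t = _rot_index(lst, rotated, m)  # amount the list shifts per rotation
--     p = _rot_index(lst, lst, m)     # minimal rotation period of the list
--     return p // _gcd(p, t)
-- ===== Notes on version B (the rewrite author's own statement) =====
-- stated objective: alternative
-- what changed: Instead of repeatedly rotating a working copy until it matches the original and counting iterations, B performs one rotation, locates its shift offset t and the list's minimal rotation period p by direct scans, and returns the closed form p // gcd(p, t); Pre_ excludes only n = 0, where A's first statement k % n raises ZeroDivisionError.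
import Mathlib
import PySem

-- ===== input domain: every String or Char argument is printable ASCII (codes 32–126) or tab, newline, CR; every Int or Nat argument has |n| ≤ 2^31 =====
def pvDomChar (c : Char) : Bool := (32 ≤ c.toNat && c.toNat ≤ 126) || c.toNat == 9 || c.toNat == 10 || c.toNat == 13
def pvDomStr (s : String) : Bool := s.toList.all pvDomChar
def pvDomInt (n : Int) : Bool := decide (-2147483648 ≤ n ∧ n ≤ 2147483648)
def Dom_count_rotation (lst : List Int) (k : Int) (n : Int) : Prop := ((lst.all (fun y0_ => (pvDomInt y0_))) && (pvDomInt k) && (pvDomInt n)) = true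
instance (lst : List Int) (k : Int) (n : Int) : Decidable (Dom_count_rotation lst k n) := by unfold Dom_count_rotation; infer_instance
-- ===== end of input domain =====

-- B replaces A's rotate-until-match counting loop by one rotation, a scan for its shift
-- offset and the list's minimal rotation period, and a gcd closed form (objective: alternative).

-- ===== PORT A =====
-- one loop body of A: mirror[-k:] + mirror[:-k]
def pyStep (k : Int) (xs : List Int) : List Int :=
  PySem.List.slice xs (some (-k)) none ++ PySem.List.slice xs none (some (-k))

-- A's 'while True' loop; the fuel only makes it total (A returns within lst.length + 1
-- iterations, proved below, so the fuel-0 branch is never the value A takes)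
def aLoop (org : List Int) (k : Int) : Nat → List Int → Int → Int
  | 0, _, count => count
  | fuel+1, mirror, count =>
      let mirror' := pyStep k mirror
      if mirror' = org then count + 1 else aLoop org k fuel mirror' (count + 1)

def count_rotation (lst : List Int) (k : Int) (n : Int) : Int :=
  let k' := PySem.Int.mod k n
  aLoop lst k' (lst.length + 1) lst 0

-- ===== PORT B =====
-- hand-written Euclid loop from Source B (its arguments there are nonnegative ints)
def bGcd : Nat → Nat → Nat
  | a, 0 => a
  | a, b+1 => bGcd (b+1) (a % (b+1))
termination_by _ b => b
decreasing_by exact Nat.mod_lt _ (Nat.succ_pos b)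

-- Source B's _rot_index: next((i for i in range(1, m) if lst[i:] + lst[:i] == target), m);
-- the scan indices i are nonnegative, where PySem.List.slice is Python-exact
def bRotIndex (lst target : List Int) (m : Nat) (i : Nat) : Nat :=
  if i < m then
    (if PySem.List.slice lst (some (i:Int)) none ++ PySem.List.slice lst none (some (i:Int)) = target
     then i else bRotIndex lst target m (i+1))
  else m
termination_by m - i

def count_rotation_alt (lst : List Int) (k : Int) (n : Int) : Int :=
  let k' := PySem.Int.mod k n
  let rotated := PySem.List.slice lst (some (-k')) none ++ PySem.List.slice lst none (some (-k'))
  if rotated = lst then 1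
  else
    let m := lst.length
    let t := bRotIndex lst rotated m 1
    let p := bRotIndex lst lst m 1
    ((p / bGcd p t : Nat) : Int)

-- ===== PRECONDITION & SPEC =====
-- Pre_ excludes exactly n = 0, where A's first statement 'k % n' raises ZeroDivisionError
def Pre_count_rotation (lst : List Int) (k : Int) (n : Int) : Prop := n ≠ 0
instance (lst : List Int) (k : Int) (n : Int) : Decidable (Pre_count_rotation lst k n) := by unfold Pre_count_rotation; infer_instance

def pvWitness_count_rotation : List Int × Int × Int := ([1, 2, 3], 1, 3)

def Spec_count_rotation (lst : List Int) (k : Int) (n : Int) (out : Int) : Prop := out = count_rotation_alt lst k n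
instance (lst : List Int) (k : Int) (n : Int) (out : Int) : Decidable (Spec_count_rotation lst k n out) := by unfold Spec_count_rotation; infer_instance

-- ===== CLAIM (what is proved, stated in full; the proofs are below) =====
def Claim_equal_count_rotation : Prop := ∀ (lst : List Int) (k : Int) (n : Int), Dom_count_rotation lst k n → Pre_count_rotation lst k n → Spec_count_rotation lst k n (count_rotation lst k n)

-- ===== LEMMAS AND PROOFS =====

theorem bGcd_eq_gcd : ∀ a b : Nat, bGcd a b = Nat.gcd a b := by
  intro a b
  induction b using Nat.strong_induction_on generalizing a with
  | _ b ih =>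
    match b with
    | 0 => simp [bGcd]
    | b+1 =>
      rw [bGcd, ih _ (Nat.mod_lt _ (Nat.succ_pos b))]
      conv_rhs => rw [Nat.gcd_comm a, Nat.gcd_rec, Nat.gcd_comm]

-- the effective left-rotation amount of one step of A (proof-side helper)
def effShift (k' : Int) (m : Nat) : Nat :=
  if 0 < k' ∧ k' < (m:Int) then k'.toNat
  else if -(m:Int) < k' ∧ k' < 0 then ((m:Int) + k').toNat
  else 0

-- one Python step is a rotation by (m - effShift) % m (slicing clamps out-of-range shifts)
theorem step_rotate (k' : Int) (m : Nat) (hm : 0 < m) (xs : List Int) (hx : xs.length = m) :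
    pyStep k' xs = xs.rotate ((m - effShift k' m) % m) := by
  unfold pyStep effShift
  by_cases h1 : 0 < k' ∧ k' < (m:Int)
  · rw [if_pos h1]
    have hk : k' = ((k'.toNat : Nat) : Int) := (Int.toNat_of_nonneg (le_of_lt h1.1)).symm
    have hs1 : 0 < k'.toNat := by omega
    have hs2 : k'.toNat < m := by omega
    rw [hk, PySem.List.slice_from_neg_natCast xs _ hs1, PySem.List.slice_to_neg_natCast xs _ hs1,
      hx, Nat.mod_eq_of_lt (by omega), List.rotate_eq_drop_append_take (by omega)]
    simp only [Int.toNat_natCast]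
  · rw [if_neg h1]
    by_cases h2 : -(m:Int) < k' ∧ k' < 0
    · rw [if_pos h2]
      have hj : -k' = (((-k').toNat : Nat) : Int) := (Int.toNat_of_nonneg (by omega)).symm
      have hjm : (-k').toNat ≤ m := by omega
      have hms : m - ((m:Int) + k').toNat = (-k').toNat := by omega
      rw [PySem.List.slice_from xs (by omega), PySem.List.slice_to xs (by omega),
        hms, Nat.mod_eq_of_lt (by omega), List.rotate_eq_drop_append_take (by omega)]
    · rw [if_neg h2, Nat.sub_zero, Nat.mod_self, List.rotate_zero]
      rcases lt_trichotomy k' 0 with hneg | hzero | hpos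
      · have hge : (m:Int) ≤ -k' := by omega
        rw [PySem.List.slice_from xs (by omega), PySem.List.slice_to xs (by omega)]
        rw [List.drop_eq_nil_of_le (by omega), List.take_of_length_le (by omega)]
        simp
      · simp [hzero, PySem.List.slice_to xs (le_refl 0)]
      · have hk : k' = ((k'.toNat : Nat) : Int) := (Int.toNat_of_nonneg (le_of_lt hpos)).symm
        have hs1 : 0 < k'.toNat := by omega
        rw [hk, PySem.List.slice_from_neg_natCast xs _ hs1, PySem.List.slice_to_neg_natCast xs _ hs1]
        have : xs.length - k'.toNat = 0 := by omega
        simp [this]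

-- B's scan returns the least i ∈ [start, m) with lst.rotate i = target (or m if none)
theorem bRotIndex_props (lst target : List Int) (m : Nat) (hm : lst.length = m) :
    ∀ d i, m - i = d → i ≤ m →
      i ≤ bRotIndex lst target m i ∧ bRotIndex lst target m i ≤ m ∧
      (bRotIndex lst target m i = m ∨ lst.rotate (bRotIndex lst target m i) = target) ∧
      (∀ u, i ≤ u → u < bRotIndex lst target m i → lst.rotate u ≠ target) := by
  intro d
  induction d with
  | zero =>
    intro i hd hle
    have ht : i = m := by omega
    rw [bRotIndex, if_neg (by omega)]
    exact ⟨by omega, le_refl m, Or.inl rfl, fun u hu hlt => by omega⟩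
  | succ d ih =>
    intro i hd hle
    have htm : i < m := by omega
    have hrot : (PySem.List.slice lst (some (i:Int)) none ++ PySem.List.slice lst none (some (i:Int)) = target)
        ↔ lst.rotate i = target := by
      rw [PySem.List.slice_from_natCast, PySem.List.slice_to_natCast,
        List.rotate_eq_drop_append_take (by omega)]
    rw [bRotIndex, if_pos htm]
    by_cases hc : PySem.List.slice lst (some (i:Int)) none ++ PySem.List.slice lst none (some (i:Int)) = target
    · rw [if_pos hc]
      exact ⟨le_refl i, by omega, Or.inr (hrot.mp hc), fun u hu hlt => by omega⟩
    · rw [if_neg hc]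
      obtain ⟨h1, h2, h3, h4⟩ := ih (i+1) (by omega) (by omega)
      refine ⟨by omega, h2, h3, fun u hu hlt => ?_⟩
      rcases Nat.eq_or_lt_of_le hu with rfl | hgt
      · exact fun h => hc (hrot.mpr h)
      · exact h4 u hgt hlt

-- multiples of a fixed point of rotate are fixed points
theorem rotate_mul_fix (lst : List Int) (p : Nat) (hp : lst.rotate p = lst) :
    ∀ c : Nat, lst.rotate (c * p) = lst := by
  intro c
  induction c with
  | zero => simp
  | succ c ih =>
    have : (c + 1) * p = c * p + p := by ring
    rw [this, ← List.rotate_rotate, ih, hp]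

-- every fixed point of rotate is a multiple of the least positive one
theorem fix_dvd (lst : List Int) (p : Nat) (hp0 : 0 < p) (hp : lst.rotate p = lst)
    (hmin : ∀ u, 1 ≤ u → u < p → lst.rotate u ≠ lst) :
    ∀ t, lst.rotate t = lst → p ∣ t := by
  intro t
  induction t using Nat.strong_induction_on with
  | _ t ih =>
    intro ht
    rcases Nat.eq_zero_or_pos t with rfl | ht0
    · exact Nat.dvd_zero p
    · have hpt : p ≤ t := by
        by_contra h
        exact hmin t (by omega) (by omega) ht
      have hsub : lst.rotate (t - p) = lst := by
        have h' : lst.rotate (p + (t - p)) = lst := by rw [Nat.add_sub_cancel' hpt]; exact ht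
        rw [← List.rotate_rotate, hp] at h'
        exact h'
      rcases Nat.eq_zero_or_pos (t - p) with hz | hpos
      · have : t = p := by omega
        exact this ▸ dvd_refl p
      · have hd := ih (t - p) (by omega) hsub
        exact (Nat.sub_add_cancel hpt) ▸ Nat.dvd_add hd (dvd_refl p)

-- p ∣ c * s ↔ (p / gcd p s) ∣ c, for 0 < p
theorem dvd_mul_iff_div_gcd_dvd (p s c : Nat) (hp : 0 < p) :
    p ∣ c * s ↔ (p / Nat.gcd p s) ∣ c := by
  set g := Nat.gcd p s with hg
  have hg0 : 0 < g := Nat.gcd_pos_of_pos_left s hp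
  have hpg : p / g * g = p := Nat.div_mul_cancel (Nat.gcd_dvd_left p s)
  have hsg : s / g * g = s := Nat.div_mul_cancel (Nat.gcd_dvd_right p s)
  have hcop : Nat.Coprime (p / g) (s / g) := Nat.coprime_div_gcd_div_gcd hg0
  constructor
  · intro h
    have h2 : (p / g) * g ∣ c * ((s / g) * g) := by rw [hpg, hsg]; exact h
    have h3 : (p / g) ∣ c * (s / g) := by
      refine (Nat.mul_dvd_mul_iff_right hg0).mp ?_
      calc p / g * g ∣ c * (s / g * g) := h2
        _ = c * (s / g) * g := by ring
    exact Nat.Coprime.dvd_of_dvd_mul_right hcop h3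
  · rintro ⟨d, rfl⟩
    have : p / g * d * s = p * (d * (s / g)) := by
      calc p / g * d * s = p / g * d * (s / g * g) := by rw [hsg]
        _ = (p / g * g) * (d * (s / g)) := by ring
        _ = p * (d * (s / g)) := by rw [hpg]
    rw [this]
    exact Dvd.intro _ rfl

-- A's loop, started j steps in with j < c₀ and enough fuel, returns c₀,
-- the least positive c with lst.rotate (c * tl) = lst
theorem aLoop_run (lst : List Int) (k' : Int) (m : Nat) (hm : lst.length = m)
    (tl : Nat) (c₀ : Nat) (hc₀ : 0 < c₀)
    (hstep : ∀ xs : List Int, xs.length = m → pyStep k' xs = xs.rotate tl)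
    (hiff : ∀ c : Nat, lst.rotate (c * tl) = lst ↔ c₀ ∣ c) :
    ∀ fuel j : Nat, j < c₀ → c₀ ≤ j + fuel →
      aLoop lst k' fuel (lst.rotate (j * tl)) (j : Int) = (c₀ : Int) := by
  intro fuel
  induction fuel with
  | zero => intro j h1 h2; omega
  | succ fuel ih =>
    intro j h1 h2
    rw [aLoop]
    have hlen : (lst.rotate (j * tl)).length = m := by rw [List.length_rotate, hm]
    have hmir : pyStep k' (lst.rotate (j * tl)) = lst.rotate ((j + 1) * tl) := by
      rw [hstep _ hlen, List.rotate_rotate]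
      congr 1
      ring
    simp only [hmir]
    by_cases he : j + 1 = c₀
    · rw [if_pos (by rw [hiff]; exact he ▸ dvd_refl _)]
      omega
    · rw [if_neg ?_]
      · have := ih (j + 1) (by omega) (by omega)
        push_cast at this ⊢
        exact this
      · rw [hiff]
        intro hdvd
        have := Nat.le_of_dvd (by omega) hdvd
        omega

theorem slice_nil (a? b? : Option Int) : PySem.List.slice ([] : List Int) a? b? = [] := by
  apply List.eq_nil_iff_forall_not_mem.mpr
  intro x hx
  exact List.not_mem_nil (PySem.List.mem_of_mem_slice _ _ _ hx)

theorem count_rotation_eq (lst : List Int) (k : Int) (n : Int) :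
    count_rotation lst k n = count_rotation_alt lst k n := by
  simp only [count_rotation, count_rotation_alt]
  set k' := PySem.Int.mod k n with hk'
  have hrot_def : PySem.List.slice lst (some (-k')) none ++ PySem.List.slice lst none (some (-k')) = pyStep k' lst := rfl
  rw [hrot_def]
  by_cases hid : pyStep k' lst = lst
  · rw [if_pos hid, aLoop]
    simp [hid]
  · rw [if_neg hid]
    have hm0 : 0 < lst.length := by
      rcases lst with _ | ⟨a, lst⟩
      · exact absurd (by simp [pyStep, slice_nil]) hid
      · simp
    set m := lst.length with hm
    set tl := (m - effShift k' m) % m with htl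
    have htlm : tl < m := Nat.mod_lt _ hm0
    have hstep : ∀ xs : List Int, xs.length = m → pyStep k' xs = xs.rotate tl := by
      intro xs hx
      rw [step_rotate k' m hm0 xs hx]
    have hrotated : pyStep k' lst = lst.rotate tl := hstep lst rfl
    rw [hrotated]
    have hrotm : lst.rotate m = lst := List.rotate_length lst
    -- period p
    obtain ⟨hp1, hpm, hpfix', hpmin⟩ := bRotIndex_props lst lst m rfl (m - 1) 1 rfl (by omega)
    set p := bRotIndex lst lst m 1 with hpdef
    have hpfix : lst.rotate p = lst := by
      rcases hpfix' with h | h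
      · rw [h]; exact hrotm
      · exact h
    have hdvd_all : ∀ u, lst.rotate u = lst ↔ p ∣ u := by
      intro u
      constructor
      · exact fix_dvd lst p (by omega) hpfix (fun v h1 h2 => hpmin v h1 h2) u
      · rintro ⟨c, rfl⟩
        rw [mul_comm]
        exact rotate_mul_fix lst p hpfix c
    -- shift offset t
    obtain ⟨ht1, htm', htfix', htmin⟩ := bRotIndex_props lst (lst.rotate tl) m rfl (m - 1) 1 rfl (by omega)
    set t := bRotIndex lst (lst.rotate tl) m 1 with htdef
    have htl1 : 1 ≤ tl := by
      rcases Nat.eq_zero_or_pos tl with hz | h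
      · rw [hz, List.rotate_zero] at hrotated
        exact absurd hrotated hid
      · omega
    have htfix : lst.rotate t = lst.rotate tl := by
      rcases htfix' with h | h
      · exact absurd rfl (htmin tl htl1 (h ▸ htlm))
      · exact h
    have httl : t ≤ tl := by
      by_contra h
      exact htmin tl htl1 (by omega) rfl
    -- gcd p t = gcd p tl
    have hpm' : p ∣ m := (hdvd_all m).mp hrotm
    have hdiff : p ∣ (tl - t) := by
      have hsum : lst.rotate (tl + (m - t)) = lst := by
        rw [← List.rotate_rotate, ← htfix, List.rotate_rotate]
        have he : t + (m - t) = m := by omega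
        rw [he, hrotm]
      have h1 : p ∣ (tl - t) + m := by
        have h2 : tl + (m - t) = (tl - t) + m := by omega
        exact h2 ▸ (hdvd_all _).mp hsum
      have h3 := Nat.dvd_sub h1 hpm'
      simpa using h3
    have hgcd : Nat.gcd p tl = Nat.gcd p t := by
      obtain ⟨c, hc⟩ := hdiff
      have he : tl = t + p * c := by omega
      rw [he, Nat.gcd_add_mul_left_right]
    -- the count c₀ and the run of A's loop
    set c₀ := p / Nat.gcd p tl with hc₀def
    have hg0 : 0 < Nat.gcd p tl := Nat.gcd_pos_of_pos_left tl (by omega)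
    have hc₀pos : 0 < c₀ := Nat.div_pos (Nat.le_of_dvd (by omega) (Nat.gcd_dvd_left p tl)) hg0
    have hc₀m : c₀ ≤ m := le_trans (Nat.div_le_self p _) hpm
    have hiff : ∀ c : Nat, lst.rotate (c * tl) = lst ↔ c₀ ∣ c := by
      intro c
      rw [hdvd_all]
      exact dvd_mul_iff_div_gcd_dvd p tl c (by omega)
    have hrun := aLoop_run lst k' m rfl tl c₀ hc₀pos hstep hiff (m + 1) 0 (by omega) (by omega)
    rw [Nat.zero_mul, List.rotate_zero] at hrun
    norm_num at hrun
    rw [hrun, bGcd_eq_gcd, ← hgcd]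

-- ===== VERDICT (by name: the statement is the Claim_ definition above) =====
theorem count_rotation_spec : Claim_equal_count_rotation := by
  intro lst k n _ _
  exact count_rotation_eq lst k n
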